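-- pv_equiv track=rewrite | github.com/Fraunhofer-AISEC/gptrace-artifacts | default/src/default/ground_truth_analysis.py | get_lost
-- ===== SOURCE A (Python) =====
-- from collections import defaultdict
--
-- def get_lost(
--     bug_cluster_dict: defaultdict[str, defaultdict[int, int]],
-- ) -> tuple[int, set[str]]:
--     """Check for bugs that do not have at least one pure cluster."""
--     num_lost = 0
--     lost_list: set[str] = set()
--     for bug_label in bug_cluster_dict.keys():
--         cluster_dict = bug_cluster_dict[bug_label]
--         other_bug_cluster_dict = {
--             other_bug_label: bug_cluster_dict[other_bug_label]
--             for other_bug_label in bug_cluster_dict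
--             if other_bug_label != bug_label
--         }
--         if all(
--             [
--                 any(
--                     [
--                         cluster_label in other_cluster_dict
--                         for other_cluster_dict in other_bug_cluster_dict.values()
--                     ]
--                 )
--                 for cluster_label in cluster_dict
--             ]
--         ):
--             num_lost += 1
--             lost_list.add(bug_label)
--
--     return num_lost, lost_list
-- ===== SOURCE B (Python) =====
-- from collections import Counter
--
--
-- def get_lost(
--     bug_cluster_dict,
-- ):
--     """Check for bugs that do not have at least one pure cluster."""
--     cnt = Counter(
--         cluster_label
--         for cluster_dict in bug_cluster_dict.values()
--         for cluster_label in cluster_dict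
--     )
--     lost_list = {
--         bug_label
--         for bug_label, cluster_dict in bug_cluster_dict.items()
--         if not any(cnt[cluster_label] == 1 for cluster_label in cluster_dict)
--     }
--     return len(lost_list), lost_list
-- ===== Notes on version B (the rewrite author's own statement) =====
-- stated objective: faster
-- what changed: Replaces A's per-bug rescan of all other bugs' cluster dicts by one global Counter of cluster labels built in a single pass, then marks a bug lost iff none of its clusters has count 1.
import Mathlib
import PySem

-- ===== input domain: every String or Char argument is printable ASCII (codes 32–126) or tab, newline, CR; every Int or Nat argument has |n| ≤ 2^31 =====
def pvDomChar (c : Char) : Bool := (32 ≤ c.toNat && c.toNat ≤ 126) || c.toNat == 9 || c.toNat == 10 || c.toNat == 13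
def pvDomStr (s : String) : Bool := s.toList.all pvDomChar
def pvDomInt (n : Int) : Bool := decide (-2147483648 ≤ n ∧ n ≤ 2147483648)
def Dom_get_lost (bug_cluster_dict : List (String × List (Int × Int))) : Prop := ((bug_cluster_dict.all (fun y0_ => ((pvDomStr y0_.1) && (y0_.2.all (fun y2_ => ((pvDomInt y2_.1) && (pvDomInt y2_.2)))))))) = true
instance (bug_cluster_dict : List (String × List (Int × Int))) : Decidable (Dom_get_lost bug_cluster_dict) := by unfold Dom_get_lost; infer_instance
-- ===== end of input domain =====

-- B replaces A's per-bug pairwise rescans by one global Counter of cluster labels and a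
-- sole-owner test per bug (objective: faster, O(total) vs O(bugs · total)).

-- the dict-of-dicts parameter, interpreted as the Python object (shared input interpretation)
def pvToDict (bcd : List (String × List (Int × Int))) : PySem.Dict String (PySem.Dict Int Int) :=
  PySem.Dict.ofList (bcd.map (fun p => (p.1, PySem.Dict.ofList p.2)))

-- ===== PORT A =====
def get_lost (bug_cluster_dict : List (String × List (Int × Int))) : Int × List String :=
  let d := pvToDict bug_cluster_dict
  d.keys.foldl
    (fun (acc : Int × List String) bug_label =>
      let cluster_dict := d.getD bug_label PySem.Dict.empty
      let other_bug_cluster_dict :=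
        (d.keys.filter (fun ob => ob != bug_label)).map (fun ob => (ob, d.getD ob PySem.Dict.empty))
      if (cluster_dict.keys.map (fun cluster_label =>
            (other_bug_cluster_dict.map (fun q => q.2.contains cluster_label)).any id)).all id
      then (acc.1 + 1, PySem.Set.add acc.2 bug_label)
      else acc)
    ((0 : Int), ([] : List String))

-- ===== PORT B =====
def get_lost_alt (bug_cluster_dict : List (String × List (Int × Int))) : Int × List String :=
  let d := pvToDict bug_cluster_dict
  let cnt := PySem.Dict.counter (d.values.flatMap (fun cluster_dict => cluster_dict.keys))
  let lost_list := PySem.Set.ofList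
    ((d.items.filter (fun p => !(p.2.keys.any (fun cluster_label => cnt.getD cluster_label 0 == 1)))).map Prod.fst)
  ((lost_list.length : Int), lost_list)

-- ===== PRECONDITION & SPEC =====
def Spec_get_lost (bug_cluster_dict : List (String × List (Int × Int))) (out : Int × List String) : Prop := out = get_lost_alt bug_cluster_dict
instance (bug_cluster_dict : List (String × List (Int × Int))) (out : Int × List String) : Decidable (Spec_get_lost bug_cluster_dict out) := by unfold Spec_get_lost; infer_instance

-- ===== CLAIM (what is proved, stated in full; the proofs are below) =====
def Claim_equal_get_lost : Prop := ∀ (bug_cluster_dict : List (String × List (Int × Int))), Dom_get_lost bug_cluster_dict → Spec_get_lost bug_cluster_dict (get_lost bug_cluster_dict)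

-- ===== LEMMAS AND PROOFS =====

-- every value stored in a fold of inserts comes from the start dict or the pair list
theorem pv_values_foldl_insert {κ ν : Type} [BEq κ] [LawfulBEq κ]
    (ps : List (κ × ν)) (d : PySem.Dict κ ν) (w : ν)
    (hw : w ∈ (ps.foldl (fun a p => a.insert p.1 p.2) d).values) :
    w ∈ d.values ∨ w ∈ ps.map (·.2) := by
  induction ps generalizing d with
  | nil => exact Or.inl hw
  | cons p t ih =>
    rcases ih _ hw with h | h
    · rcases PySem.Dict.mem_values_insert _ _ _ _ h with h' | h'
      · exact Or.inr (by simp [h'])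
      · exact Or.inl h'
    · exact Or.inr (by simp; right; simpa using h)

-- every inner dict of pvToDict has duplicate-free keys
theorem pv_inner_nodup (bcd : List (String × List (Int × Int))) (ob : String) :
    ((pvToDict bcd).getD ob PySem.Dict.empty).keys.Nodup := by
  rcases h : (pvToDict bcd).get? ob with _ | v
  · rw [PySem.Dict.getD_eq_get?_getD, h]
    simp [PySem.Dict.empty, PySem.Dict.keys]
  · rw [PySem.Dict.getD_eq_get?_getD, h]
    have hv : v ∈ (pvToDict bcd).values := by
      have := PySem.Dict.mem_items_of_get?_eq_some _ h
      simp only [PySem.Dict.values]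
      exact List.mem_map.mpr ⟨(ob, v), this, rfl⟩
    have := pv_values_foldl_insert (bcd.map (fun p => (p.1, PySem.Dict.ofList p.2)))
      PySem.Dict.empty v (by simpa [pvToDict, PySem.Dict.ofList, PySem.Dict.update] using hv)
    rcases this with h' | h'
    · simp [PySem.Dict.empty, PySem.Dict.values] at h'
    · simp only [List.map_map, List.mem_map] at h'
      rcases h' with ⟨p, _, rfl⟩
      exact PySem.Dict.nodup_keys_ofList _

-- A's loop over duplicate-free keys is a filter together with its length
theorem pv_loopA_shape (P : String → Bool) :
    ∀ (l : List String) (n : Int) (s : List String), l.Nodup → (∀ x ∈ l, x ∉ s) →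
    l.foldl (fun acc x => if P x then (acc.1 + 1, PySem.Set.add acc.2 x) else acc) (n, s)
      = (n + ((l.filter P).length : Int), s ++ l.filter P) := by
  intro l
  induction l with
  | nil => intro n s _ _; simp
  | cons x t ih =>
    intro n s hnd hdisj
    simp only [List.foldl_cons]
    by_cases hP : P x
    · have hx : PySem.Set.add s x = s ++ [x] := by
        have hxs : x ∉ s := hdisj x (List.mem_cons_self) 
        simp [PySem.Set.add]
        intro hc
        exact absurd hc hxs
      rw [if_pos hP, hx]
      rw [ih (n + 1) (s ++ [x]) hnd.of_cons ?_]
      · simp [hP]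
        omega
      · intro y hy
        simp only [List.mem_append, List.mem_singleton]
        rintro (h | rfl)
        · exact hdisj y (List.mem_cons_of_mem _ hy) h
        · exact (List.nodup_cons.mp hnd).1 hy
    · rw [if_neg hP, ih n s hnd.of_cons (fun y hy => hdisj y (List.mem_cons_of_mem _ hy))]
      simp [hP]

-- sum of 0/1 indicators is the length of the filter
theorem pv_sum_indicator {α : Type} (l : List α) (p : α → Prop) [DecidablePred p] :
    (l.map (fun x => if p x then (1 : Nat) else 0)).sum = (l.filter (fun x => decide (p x))).length := by
  induction l with
  | nil => rfl
  | cons x t ih => by_cases h : p x <;> simp [h, ih] <;> omega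

-- a Nodup list with a member satisfying Q: another member satisfies Q iff the filter has length ≠ 1
theorem pv_other_iff {α : Type} [DecidableEq α] (l : List α) (Q : α → Bool) (x : α)
    (hnd : l.Nodup) (hx : x ∈ l) (hQ : Q x = true) :
    (∃ y ∈ l, y ≠ x ∧ Q y = true) ↔ (l.filter Q).length ≠ 1 := by
  obtain ⟨l₁, l₂, rfl⟩ := List.append_of_mem hx
  have hx' : x ∉ l₁ ++ l₂ := by
    have := List.nodup_middle.mp hnd
    intro h; exact (List.nodup_cons.mp this).1 h
  have hlen : ((l₁ ++ x :: l₂).filter Q).length = (l₁.filter Q).length + (l₂.filter Q).length + 1 := by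
    rw [List.filter_append, List.filter_cons_of_pos hQ]
    simp [List.length_append]
    omega
  constructor
  · rintro ⟨y, hy, hyx, hQy⟩
    have hy' : y ∈ l₁ ++ l₂ := by
      rcases List.mem_append.mp hy with h | h
      · exact List.mem_append.mpr (Or.inl h)
      · rcases List.mem_cons.mp h with rfl | h
        · exact absurd rfl hyx
        · exact List.mem_append.mpr (Or.inr h)
    have h2 := List.length_pos_of_mem (List.mem_filter.mpr ⟨hy', hQy⟩)
    rw [List.filter_append, List.length_append] at h2
    rw [hlen]
    omega
  · intro h
    rw [hlen] at h
    have hne : ((l₁ ++ l₂).filter Q) ≠ [] := by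
      intro hnil
      have h0 := congrArg List.length hnil
      rw [List.filter_append, List.length_append] at h0
      simp only [List.length_nil] at h0
      omega
    obtain ⟨y, hy⟩ := List.exists_mem_of_ne_nil _ hne
    have hmf := List.mem_filter.mp hy
    refine ⟨y, ?_, ?_, hmf.2⟩
    · rcases List.mem_append.mp hmf.1 with h' | h'
      · exact List.mem_append.mpr (Or.inl h')
      · exact List.mem_append.mpr (Or.inr (List.mem_cons_of_mem _ h'))
    · rintro rfl; exact hx' hmf.1

-- the global counter at c counts the bugs whose cluster dict contains c
theorem pv_count_flat (d : PySem.Dict String (PySem.Dict Int Int)) (hk : d.keys.Nodup)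
    (hv : ∀ ob, (d.getD ob PySem.Dict.empty).keys.Nodup) (c : Int) :
    (d.values.flatMap (fun cd => cd.keys)).count c
      = (d.keys.filter (fun ob => (d.getD ob PySem.Dict.empty).contains c)).length := by
  rw [PySem.Dict.values_eq_map_keys d hk PySem.Dict.empty, List.count_flatMap, List.map_map]
  have : ∀ ob ∈ d.keys,
      ((List.count c ∘ fun cd => cd.keys) ∘ fun k => d.getD k PySem.Dict.empty) ob
        = (fun ob => if (d.getD ob PySem.Dict.empty).contains c then (1:Nat) else 0) ob := by
    intro ob _
    simp only [Function.comp]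
    by_cases h : (d.getD ob PySem.Dict.empty).contains c
    · rw [if_pos h]
      exact List.count_eq_one_of_mem (hv ob) ((PySem.Dict.contains_iff_mem_keys _ _).mp h)
    · rw [if_neg h]
      exact List.count_eq_zero_of_not_mem
        (fun hm => h ((PySem.Dict.contains_iff_mem_keys _ _).mpr hm))
  rw [List.map_congr_left this]
  have := pv_sum_indicator d.keys (fun ob => (d.getD ob PySem.Dict.empty).contains c = true)
  simpa using this

-- pointwise: A's shared-with-some-other-bug test equals B's no-sole-count test
theorem pv_pointwise (d : PySem.Dict String (PySem.Dict Int Int)) (hk : d.keys.Nodup)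
    (hv : ∀ ob, (d.getD ob PySem.Dict.empty).keys.Nodup) (bug : String) (hb : bug ∈ d.keys) :
    ((d.getD bug PySem.Dict.empty).keys.map (fun c =>
        (((d.keys.filter (fun ob => ob != bug)).map (fun ob => (ob, d.getD ob PySem.Dict.empty))).map
          (fun q => q.2.contains c)).any id)).all id
      = !((d.getD bug PySem.Dict.empty).keys.any (fun c =>
          (PySem.Dict.counter (d.values.flatMap (fun cd => cd.keys))).getD c 0 == 1)) := by
  have key : ∀ c ∈ (d.getD bug PySem.Dict.empty).keys,
      ((d.keys.filter (fun ob => ob != bug)).any (fun ob => (d.getD ob PySem.Dict.empty).contains c))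
        = !((PySem.Dict.counter (d.values.flatMap (fun cd => cd.keys))).getD c 0 == 1) := by
    intro c hc
    have hQ : (d.getD bug PySem.Dict.empty).contains c = true :=
      (PySem.Dict.contains_iff_mem_keys _ _).mpr hc
    have hcnt : (PySem.Dict.counter (d.values.flatMap (fun cd => cd.keys))).getD c 0
        = ((d.keys.filter (fun ob => (d.getD ob PySem.Dict.empty).contains c)).length : Int) := by
      rw [PySem.Dict.getD_counter, pv_count_flat d hk hv]
    rw [Bool.eq_iff_iff, List.any_eq_true]
    constructor
    · rintro ⟨ob, hob, hcon⟩
      have hob' := List.mem_filter.mp hob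
      have hex : ∃ y ∈ d.keys, y ≠ bug ∧ (d.getD y PySem.Dict.empty).contains c = true :=
        ⟨ob, hob'.1, by simpa using hob'.2, hcon⟩
      have hne := (pv_other_iff d.keys _ bug hk hb hQ).mp hex
      simp only [hcnt, Bool.not_eq_true', beq_eq_false_iff_ne, ne_eq]
      exact_mod_cast hne
    · intro h
      have hne : (d.keys.filter (fun ob => (d.getD ob PySem.Dict.empty).contains c)).length ≠ 1 := by
        simp only [hcnt, Bool.not_eq_true', beq_eq_false_iff_ne, ne_eq] at h
        exact_mod_cast h
      obtain ⟨y, hy, hyb, hYc⟩ := (pv_other_iff d.keys _ bug hk hb hQ).mpr hne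
      exact ⟨y, List.mem_filter.mpr ⟨hy, by simpa using hyb⟩, hYc⟩
  rw [Bool.eq_iff_iff]
  simp only [List.all_map, List.any_map, Function.comp_def, List.all_eq_true, Bool.not_eq_true',
    List.any_eq_false, id_eq]
  constructor
  · intro h c hc
    have h1 := h c hc
    rw [key c hc] at h1
    simpa using h1
  · intro h c hc
    rw [key c hc]
    simpa using h c hc

theorem get_lost_eq (bcd : List (String × List (Int × Int))) :
    get_lost bcd = get_lost_alt bcd := by
  simp only [get_lost, get_lost_alt]
  have hk : (pvToDict bcd).keys.Nodup := PySem.Dict.nodup_keys_ofList _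
  have hv := pv_inner_nodup bcd
  rw [pv_loopA_shape _ (pvToDict bcd).keys 0 [] hk (by simp)]
  have hkm : ((pvToDict bcd).items.map Prod.fst).Nodup := by
    simpa [PySem.Dict.keys] using hk
  have hnodL : (((pvToDict bcd).items.filter
      (fun p => !(p.2.keys.any (fun c =>
        (PySem.Dict.counter ((pvToDict bcd).values.flatMap (fun cd => cd.keys))).getD c 0 == 1)))).map
      Prod.fst).Nodup :=
    (List.Sublist.map Prod.fst List.filter_sublist).nodup hkm
  rw [PySem.Set.ofList_eq_self_of_nodup _ hnodL]
  have hfe : ((pvToDict bcd).keys.filter (fun bug =>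
      ((((pvToDict bcd).getD bug PySem.Dict.empty).keys.map (fun cluster_label =>
        ((((pvToDict bcd).keys.filter (fun ob => ob != bug)).map
          (fun ob => (ob, (pvToDict bcd).getD ob PySem.Dict.empty))).map
          (fun q => q.2.contains cluster_label)).any id)).all id)))
      = (((pvToDict bcd).items.filter
          (fun p => !(p.2.keys.any (fun c =>
            (PySem.Dict.counter ((pvToDict bcd).values.flatMap (fun cd => cd.keys))).getD c 0 == 1)))).map
          Prod.fst) := by
    rw [PySem.Dict.items_eq_map_keys _ hk PySem.Dict.empty, List.filter_map, List.map_map]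
    simp only [Function.comp_def]
    rw [List.map_id_fun']
    simp only [id_eq]
    exact List.filter_congr (fun bug hb => pv_pointwise (pvToDict bcd) hk hv bug hb)
  rw [hfe]
  simp

-- ===== VERDICT (by name: the statement is the Claim_ definition above) =====
theorem get_lost_spec : Claim_equal_get_lost := by
  intro bcd _
  unfold Spec_get_lost
  exact get_lost_eq bcd
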